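-- pv_equiv track=rewrite | github.com/jun-uen0/leetcode | py/2.medium/minimum-size-subarray-sum.py | minSubArr
-- ===== SOURCE A (Python) =====
-- def minSubArr(nums,target):
--   l = 0
--   for i in range(len(nums)):
--     st = []
--     for j in range(len(nums) -i):
--       st.append(nums[j+i])
--       if sum(st) == target:
--         if l > len(st) or l == 0:
--           l = len(st)
--   return l
-- ===== SOURCE B (Python) =====
-- def minSubArr(nums, target):
--     best = 0
--     last = {0: 0}   # prefix sum value -> last index where it occurs
--     p = 0
--     for e, x in enumerate(nums, 1):
--         p += x
--         i = last.get(p - target)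
--         if i is not None:
--             L = e - i
--             if best == 0 or L < best:
--                 best = L
--         last[p] = e
--     return best
-- ===== Notes on version B (the rewrite author's own statement) =====
-- stated objective: faster
-- what changed: Replaced the triple pass (every start, growing window, sum recomputed with sum(st)) by a single left-to-right pass over prefix sums with a hashmap storing the last index of each prefix value, so the minimal length ending at each position is found by one dict lookup.
import Mathlib
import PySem

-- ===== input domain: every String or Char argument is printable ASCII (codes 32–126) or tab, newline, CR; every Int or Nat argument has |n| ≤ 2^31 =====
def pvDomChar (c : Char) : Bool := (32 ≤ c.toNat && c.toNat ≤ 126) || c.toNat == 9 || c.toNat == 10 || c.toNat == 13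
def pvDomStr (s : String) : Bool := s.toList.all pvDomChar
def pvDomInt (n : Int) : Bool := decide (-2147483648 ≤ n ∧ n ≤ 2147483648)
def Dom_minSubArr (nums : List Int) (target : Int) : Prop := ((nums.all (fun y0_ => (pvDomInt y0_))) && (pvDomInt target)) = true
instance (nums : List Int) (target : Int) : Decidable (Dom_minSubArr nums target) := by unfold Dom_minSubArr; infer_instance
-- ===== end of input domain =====

-- B replaces A's triple pass (O(n^3): every start, growing window, sum() recomputed) by a single
-- prefix-sum pass with a hashmap of the last index of each prefix value (O(n)); asymptotic speed-up.


-- ===== PORT A =====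
def minSubArr (nums : List Int) (target : Int) : Int :=
  (PySem.List.pyRange 0 (PySem.List.len nums) 1).foldl
    (fun l i =>
      ((PySem.List.pyRange 0 (PySem.List.len nums - i) 1).foldl
        (fun (s : List Int × Int) j =>
          let st := s.1 ++ [PySem.List.pyGetD nums (j + i) 0]
          if st.sum = target then
            if s.2 > (st.length : Int) ∨ s.2 = 0 then (st, (st.length : Int)) else (st, s.2)
          else (st, s.2))
        ([], l)).2)
    0

-- ===== PORT B =====
def minSubArr_alt (nums : List Int) (target : Int) : Int :=
  ((PySem.List.enumerate nums 1).foldl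
    (fun (s : Int × PySem.Dict Int Int × Int) (ex : Int × Int) =>
      let p := s.2.2 + ex.2
      let best :=
        match s.2.1.get? (p - target) with
        | some i =>
          let L := ex.1 - i
          if s.1 = 0 ∨ L < s.1 then L else s.1
        | none => s.1
      (best, (s.2.1.insert p ex.1, p)))
    (0, (PySem.Dict.empty.insert 0 0, 0))).1

-- ===== PRECONDITION & SPEC =====
def Spec_minSubArr (nums : List Int) (target : Int) (out : Int) : Prop := out = minSubArr_alt nums target
instance (nums : List Int) (target : Int) (out : Int) : Decidable (Spec_minSubArr nums target out) := by unfold Spec_minSubArr; infer_instance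

-- ===== CLAIM (what is proved, stated in full; the proofs are below) =====
def Claim_equal_minSubArr : Prop := ∀ (nums : List Int) (target : Int), Dom_minSubArr nums target → Spec_minSubArr nums target (minSubArr nums target)

-- ===== LEMMAS AND PROOFS =====

-- the update A performs on a matching length: "take x if current l is 0 or larger"
def pvUpd (l x : Int) : Int := if l > x ∨ l = 0 then x else l

-- prefix sum of the first k elements
def pvPre (nums : List Int) (k : Nat) : Int := (nums.take k).sum

-- lengths of matching subarrays in the order A visits them
def pvLensA (nums : List Int) (target : Int) : List Int :=
  (List.range nums.length).flatMap (fun i =>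
    (List.range (nums.length - i)).filterMap (fun j =>
      if ((nums.drop i).take (j+1)).sum = target then some ((j : Int) + 1) else none))

-- the largest k < e with pvPre k = pvPre e - target (what B's dict lookup returns at end e)
def pvLast (nums : List Int) (target : Int) (e : Nat) : Option Nat :=
  ((List.range e).filter (fun k => decide (pvPre nums k = pvPre nums e - target))).getLast?

-- lengths B considers: the minimal matching length ending at each position
def pvLensB (nums : List Int) (target : Int) : List Int :=
  (List.range nums.length).flatMap (fun e' =>
    match pvLast nums target (e'+1) with
    | some k => [((e' : Int) + 1) - (k : Int)]
    | none => [])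

theorem pvUpd_eq (l x : Int) : pvUpd l x = if l = 0 then x else min l x := by
  simp only [min_def]
  unfold pvUpd
  split_ifs <;> omega

theorem foldl_pvUpd_pos (L : List Int) (h : ∀ x ∈ L, 1 ≤ x) :
    ∀ l : Int, 1 ≤ l → L.foldl pvUpd l = L.foldl min l := by
  induction L with
  | nil => intro l _; rfl
  | cons x t ih =>
    intro l hl
    have hx : 1 ≤ x := h x (by simp)
    have : pvUpd l x = min l x := by rw [pvUpd_eq]; simp [show l ≠ 0 by omega]
    simp only [List.foldl_cons, this]
    exact ih (fun y hy => h y (by simp [hy])) _ (by simp [min_def]; omega)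

theorem foldl_pvUpd_zero_cons (x : Int) (t : List Int) (h : ∀ z ∈ x :: t, 1 ≤ z) :
    (x :: t).foldl pvUpd 0 = t.foldl min x := by
  have hx : 1 ≤ x := h x (by simp)
  simp only [List.foldl_cons]
  have h0 : pvUpd 0 x = x := by rw [pvUpd_eq]; simp
  rw [h0]
  exact foldl_pvUpd_pos t (fun y hy => h y (by simp [hy])) x hx

-- the min-with-0-sentinel fold depends only on mutual domination of the length lists
theorem foldl_pvUpd_eq_of_dom (L1 L2 : List Int)
    (h1 : ∀ x ∈ L1, 1 ≤ x) (h2 : ∀ x ∈ L2, 1 ≤ x)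
    (d12 : ∀ x ∈ L1, ∃ y ∈ L2, y ≤ x) (d21 : ∀ y ∈ L2, ∃ x ∈ L1, x ≤ y) :
    L1.foldl pvUpd 0 = L2.foldl pvUpd 0 := by
  cases L1 with
  | nil =>
    cases L2 with
    | nil => rfl
    | cons y t2 =>
      rcases d21 y (by simp) with ⟨x, hx, -⟩
      simp at hx
  | cons x t1 =>
    cases L2 with
    | nil =>
      rcases d12 x (by simp) with ⟨y, hy, -⟩
      simp at hy
    | cons y t2 =>
      rw [foldl_pvUpd_zero_cons x t1 h1, foldl_pvUpd_zero_cons y t2 h2]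
      have r1lb : ∀ z ∈ x :: t1, List.foldl min x t1 ≤ z := by
        intro z hz
        rcases List.mem_cons.1 hz with rfl | hz
        · exact (PySem.List.foldl_min_le t1 _).1
        · exact (PySem.List.foldl_min_le t1 _).2 z hz
      have r2lb : ∀ z ∈ y :: t2, List.foldl min y t2 ≤ z := by
        intro z hz
        rcases List.mem_cons.1 hz with rfl | hz
        · exact (PySem.List.foldl_min_le t2 _).1
        · exact (PySem.List.foldl_min_le t2 _).2 z hz
      have r1mem : List.foldl min x t1 ∈ x :: t1 := by
        rcases PySem.List.foldl_min_mem t1 x with h | h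
        · simp [h]
        · simp [h]
      have r2mem : List.foldl min y t2 ∈ y :: t2 := by
        rcases PySem.List.foldl_min_mem t2 y with h | h
        · simp [h]
        · simp [h]
      rcases d12 _ r1mem with ⟨b, hb, hble⟩
      rcases d21 _ r2mem with ⟨a, ha, hale⟩
      have h1' := r1lb a ha
      have h2' := r2lb b hb
      omega

theorem pvPre_add_slice (nums : List Int) (a L : Nat) :
    pvPre nums (a + L) = pvPre nums a + ((nums.drop a).take L).sum := by
  unfold pvPre
  rw [List.take_add, List.sum_append]

theorem mem_pvLensA (nums : List Int) (target : Int) (x : Int) :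
    x ∈ pvLensA nums target ↔
      ∃ a L : Nat, 1 ≤ L ∧ a + L ≤ nums.length ∧
        pvPre nums (a + L) - pvPre nums a = target ∧ x = (L : Int) := by
  unfold pvLensA
  simp only [List.mem_flatMap, List.mem_filterMap, List.mem_range]
  constructor
  · rintro ⟨i, hi, j, hj, hx⟩
    by_cases hc : ((nums.drop i).take (j+1)).sum = target
    · refine ⟨i, j + 1, by omega, by omega, ?_, ?_⟩
      · rw [pvPre_add_slice]; omega
      · simp [hc] at hx; push_cast; omega
    · simp [hc] at hx
  · rintro ⟨a, L, hL, hab, hsum, rfl⟩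
    refine ⟨a, by omega, L - 1, by omega, ?_⟩
    have h1 : a + ((L - 1) + 1) = a + L := by omega
    have hc : ((nums.drop a).take ((L-1)+1)).sum = target := by
      have := pvPre_add_slice nums a ((L-1)+1)
      rw [h1] at this; omega
    simp [hc]; omega

theorem le_getLast_of_pairwise {l : List Nat} (hp : l.Pairwise (· < ·)) {a k : Nat}
    (ha : a ∈ l) (hk : l.getLast? = some k) : a ≤ k := by
  induction l with
  | nil => simp at ha
  | cons h t ih =>
    cases t with
    | nil =>
      simp at ha hk; omega
    | cons h2 t2 =>
      rw [List.getLast?_cons_cons] at hk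
      rcases List.mem_cons.1 ha with rfl | ha'
      · have hk' := List.mem_of_getLast? hk
        have := (List.pairwise_cons.1 hp).1 k hk'
        omega
      · exact ih (List.pairwise_cons.1 hp).2 ha' hk

-- every length B considers comes from a matching pair
theorem mem_pvLensB_elim (nums : List Int) (target : Int) (y : Int)
    (hy : y ∈ pvLensB nums target) :
    ∃ k e : Nat, k < e ∧ e ≤ nums.length ∧
      pvPre nums e - pvPre nums k = target ∧ y = (e : Int) - (k : Int) := by
  unfold pvLensB at hy
  simp only [List.mem_flatMap, List.mem_range] at hy
  rcases hy with ⟨e', he', hy⟩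
  cases hlast : pvLast nums target (e' + 1) with
  | none => simp [hlast] at hy
  | some k =>
    simp [hlast] at hy
    have hmem := List.mem_of_getLast? hlast
    simp only [List.mem_filter, List.mem_range, decide_eq_true_eq] at hmem
    exact ⟨k, e' + 1, by omega, by omega, by omega, by omega⟩

-- every matching pair is dominated by the length B considers at its end
theorem pvLensB_dominates (nums : List Int) (target : Int) (a L : Nat)
    (hL : 1 ≤ L) (hab : a + L ≤ nums.length)
    (hsum : pvPre nums (a + L) - pvPre nums a = target) :
    ∃ y ∈ pvLensB nums target, y ≤ (L : Int) := by
  set e := a + L with he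
  have hfa : a ∈ (List.range e).filter
      (fun k => decide (pvPre nums k = pvPre nums e - target)) := by
    simp only [List.mem_filter, List.mem_range, decide_eq_true_eq]
    constructor
    · omega
    · omega
  have hne : ((List.range e).filter
      (fun k => decide (pvPre nums k = pvPre nums e - target))) ≠ [] :=
    List.ne_nil_of_mem hfa
  rcases Option.ne_none_iff_exists'.1 (mt List.getLast?_eq_none_iff.1 hne) with ⟨k, hk⟩
  have hak : a ≤ k :=
    le_getLast_of_pairwise (List.pairwise_lt_range.filter _) hfa hk
  have hkmem := List.mem_of_getLast? hk
  simp only [List.mem_filter, List.mem_range, decide_eq_true_eq] at hkmem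
  refine ⟨(e : Int) - (k : Int), ?_, by omega⟩
  unfold pvLensB
  simp only [List.mem_flatMap, List.mem_range]
  refine ⟨e - 1, by omega, ?_⟩
  have he1 : e - 1 + 1 = e := by omega
  rw [he1]
  unfold pvLast
  rw [hk]
  simp only [List.mem_singleton]
  omega

theorem pvLensA_pos (nums : List Int) (target : Int) : ∀ x ∈ pvLensA nums target, 1 ≤ x := by
  intro x hx
  rcases (mem_pvLensA nums target x).1 hx with ⟨a, L, hL, -, -, rfl⟩
  exact_mod_cast hL

theorem pvLensB_pos (nums : List Int) (target : Int) : ∀ y ∈ pvLensB nums target, 1 ≤ y := by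
  intro y hy
  rcases mem_pvLensB_elim nums target y hy with ⟨k, e, hke, -, -, rfl⟩
  omega

-- ---- characterization of A ----

theorem innerA (nums : List Int) (target : Int) (i : Nat) :
    ∀ (m : Nat), i + m ≤ nums.length → ∀ l : Int,
    ((PySem.List.pyRange 0 (m : Int) 1).foldl
      (fun (s : List Int × Int) j =>
        let st := s.1 ++ [PySem.List.pyGetD nums (j + (i : Int)) 0]
        if st.sum = target then
          if s.2 > (st.length : Int) ∨ s.2 = 0 then (st, (st.length : Int)) else (st, s.2)
        else (st, s.2))
      ([], l))
    = ((nums.drop i).take m,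
       ((List.range m).filterMap (fun j =>
          if ((nums.drop i).take (j+1)).sum = target then some ((j : Int) + 1) else none)).foldl
         pvUpd l) := by
  intro m
  induction m with
  | zero => intro _ l; rfl
  | succ m ih =>
    intro hm l
    have hcast : ((m + 1 : Nat) : Int) = (m : Int) + 1 := by push_cast; ring
    rw [hcast, PySem.List.pyRange_one_succ_right (by positivity), List.foldl_append,
        ih (by omega) l]
    have hidx : (0 : Int) ≤ (m : Int) + (i : Int) := by positivity
    have hidx2 : (m : Int) + (i : Int) < (nums.length : Int) := by omega
    have hget : PySem.List.pyGetD nums ((m : Int) + (i : Int)) 0 = nums[i + m]'(by omega) := by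
      rw [PySem.List.pyGetD_eq_getElem nums 0 hidx hidx2]
      congr 1
      omega
    have hst : (nums.drop i).take m ++ [nums[i + m]'(by omega)] = (nums.drop i).take (m + 1) := by
      rw [List.take_add_one]
      congr 1
      rw [List.getElem?_drop, List.getElem?_eq_getElem (by omega)]
      rfl
    have hlen : ((nums.drop i).take (m + 1)).length = m + 1 := by
      simp [List.length_take, List.length_drop]
      omega
    simp only [List.foldl_cons, List.foldl_nil, hget, hst]
    rw [List.range_succ, List.filterMap_append, List.foldl_append]
    by_cases hc : ((nums.drop i).take (m + 1)).sum = target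
    · simp only [hc, if_true, hlen, List.filterMap_cons, List.filterMap_nil, List.foldl_cons,
        List.foldl_nil]
      unfold pvUpd
      push_cast
      split_ifs <;> rfl
    · simp [hc]

theorem Achar (nums : List Int) (target : Int) :
    minSubArr nums target = (pvLensA nums target).foldl pvUpd 0 := by
  unfold minSubArr
  rw [PySem.List.pyRange_one]
  have hlen : ((PySem.List.len nums : Int) - 0).toNat = nums.length := by
    simp [PySem.List.len]
  rw [hlen, List.foldl_map]
  unfold pvLensA
  rw [List.foldl_flatMap]
  apply PySem.List.foldl_congr_mem
  intro l k hk
  simp only [List.mem_range] at hk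
  have h1 : (PySem.List.len nums : Int) - (0 + (k : Int)) = ((nums.length - k : Nat) : Int) := by
    simp [PySem.List.len]; omega
  have h2 : ∀ (s : List Int × Int) (j : Int),
      (fun (s : List Int × Int) j =>
        let st := s.1 ++ [PySem.List.pyGetD nums (j + (0 + (k:Int))) 0]
        if st.sum = target then
          if s.2 > (st.length : Int) ∨ s.2 = 0 then (st, (st.length : Int)) else (st, s.2)
        else (st, s.2)) s j
      = (fun (s : List Int × Int) j =>
        let st := s.1 ++ [PySem.List.pyGetD nums (j + (k:Int)) 0]
        if st.sum = target then
          if s.2 > (st.length : Int) ∨ s.2 = 0 then (st, (st.length : Int)) else (st, s.2)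
        else (st, s.2)) s j := by
    intro s j
    simp only [zero_add]
  rw [h1]
  have := innerA nums target k (nums.length - k) (by omega) l
  simp only [funext (fun s => funext (h2 s))]
  rw [this]

-- ---- characterization of B ----

theorem pvGetInsertFold (g : Nat → Int) (m : Nat) (v : Int) :
    ((List.range m).foldl (fun d k => d.insert (g k) ((k : Nat) : Int)) PySem.Dict.empty).get? v
    = (((List.range m).filter (fun k => decide (g k = v))).getLast?).map (fun k => ((k : Nat) : Int)) := by
  induction m with
  | zero => simp [PySem.Dict.get?_empty]
  | succ m ih =>
    rw [List.range_succ, List.foldl_append, List.foldl_cons, List.foldl_nil,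
        PySem.Dict.get?_insert, List.filter_append]
    by_cases hc : g m = v
    · simp [hc]
    · have hnil : (List.filter (fun k => decide (g k = v)) [m]) = [] := by simp [hc]
      rw [if_neg (fun h => hc h.symm), hnil, List.append_nil]
      exact ih

theorem pvPre_append_of_le (xs : List Int) (x : Int) (k : Nat) (hk : k ≤ xs.length) :
    pvPre (xs ++ [x]) k = pvPre xs k := by
  unfold pvPre
  rw [List.take_append_of_le_length hk]

theorem pvPre_append_full (xs : List Int) (x : Int) :
    pvPre (xs ++ [x]) (xs.length + 1) = xs.sum + x := by
  unfold pvPre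
  rw [List.take_of_length_le (by simp)]
  simp

theorem pvLast_append_of_le (xs : List Int) (x : Int) (target : Int) (e : Nat)
    (he : e ≤ xs.length) :
    pvLast (xs ++ [x]) target e = pvLast xs target e := by
  unfold pvLast
  congr 1
  apply List.filter_congr
  intro k hk
  simp only [List.mem_range] at hk
  rw [pvPre_append_of_le xs x k (by omega), pvPre_append_of_le xs x e he]

theorem Bfold (xs : List Int) (target : Int) :
    ((PySem.List.enumerate xs 1).foldl
      (fun (s : Int × PySem.Dict Int Int × Int) (ex : Int × Int) =>
        let p := s.2.2 + ex.2
        let best :=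
          match s.2.1.get? (p - target) with
          | some i =>
            let L := ex.1 - i
            if s.1 = 0 ∨ L < s.1 then L else s.1
          | none => s.1
        (best, (s.2.1.insert p ex.1, p)))
      (0, (PySem.Dict.empty.insert 0 0, 0)))
    = ((pvLensB xs target).foldl pvUpd 0,
       ((List.range (xs.length + 1)).foldl
          (fun d k => d.insert (pvPre xs k) ((k : Nat) : Int)) PySem.Dict.empty,
        xs.sum)) := by
  induction xs using List.reverseRecOn with
  | nil => rfl
  | append_singleton xs x ih =>
    rw [PySem.List.enumerate_append, List.foldl_append, ih]
    have hsingle : PySem.List.enumerate [x] (1 + (xs.length : Int)) = [(1 + (xs.length : Int), x)] := rfl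
    rw [hsingle, List.foldl_cons, List.foldl_nil]
    have hpre_top : pvPre (xs ++ [x]) (xs.length + 1) = xs.sum + x := pvPre_append_full xs x
    have hlook :
        ((List.range (xs.length + 1)).foldl
          (fun d k => d.insert (pvPre xs k) ((k : Nat) : Int)) PySem.Dict.empty).get?
          (xs.sum + x - target)
        = (pvLast (xs ++ [x]) target (xs.length + 1)).map (fun k => ((k : Nat) : Int)) := by
      rw [pvGetInsertFold]
      unfold pvLast
      congr 1
      congr 1
      apply List.filter_congr
      intro k hk
      simp only [List.mem_range] at hk
      rw [pvPre_append_of_le xs x k (by omega), hpre_top]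
    have hdict :
        (List.range ((xs ++ [x]).length + 1)).foldl
          (fun d k => d.insert (pvPre (xs ++ [x]) k) ((k : Nat) : Int)) PySem.Dict.empty
        = ((List.range (xs.length + 1)).foldl
            (fun d k => d.insert (pvPre xs k) ((k : Nat) : Int)) PySem.Dict.empty).insert
            (xs.sum + x) ((xs.length + 1 : Nat) : Int) := by
      have hl : (xs ++ [x]).length + 1 = (xs.length + 1) + 1 := by simp
      rw [hl, List.range_succ, List.foldl_append, List.foldl_cons, List.foldl_nil, hpre_top]
      congr 1
      apply PySem.List.foldl_congr_mem
      intro d k hk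
      simp only [List.mem_range] at hk
      rw [pvPre_append_of_le xs x k (by omega)]
    have hlens : pvLensB (xs ++ [x]) target
        = pvLensB xs target ++
          (match pvLast (xs ++ [x]) target (xs.length + 1) with
           | some k => [((xs.length : Int) + 1) - (k : Int)]
           | none => []) := by
      unfold pvLensB
      have hl : (xs ++ [x]).length = xs.length + 1 := by simp
      rw [hl, List.range_succ, List.flatMap_append]
      congr 1
      · apply List.flatMap_congr
        intro e' he'
        simp only [List.mem_range] at he'
        rw [pvLast_append_of_le xs x target (e' + 1) (by omega)]
      · simp
    rw [hlens, hdict]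
    have hsum2 : (xs ++ [x]).sum = xs.sum + x := by simp
    rw [hsum2]
    cases hcase : pvLast (xs ++ [x]) target (xs.length + 1) with
    | none =>
      simp only [hlook, hcase, Option.map_none, List.append_nil]
      refine Prod.ext rfl (Prod.ext ?_ rfl)
      simp only []
      congr 1
      push_cast
      ring
    | some k =>
      simp only [hlook, hcase, Option.map_some, List.foldl_append, List.foldl_cons,
        List.foldl_nil]
      refine Prod.ext ?_ (Prod.ext ?_ rfl)
      · simp only [pvUpd]
        split_ifs <;> ring_nf <;> omega
      · simp only []
        congr 1
        push_cast
        ring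

theorem Bchar (nums : List Int) (target : Int) :
    minSubArr_alt nums target = (pvLensB nums target).foldl pvUpd 0 := by
  unfold minSubArr_alt
  rw [Bfold]

-- ===== VERDICT (by name: the statement is the Claim_ definition above) =====
theorem minSubArr_spec : Claim_equal_minSubArr := by
  intro nums target _
  unfold Spec_minSubArr
  rw [Achar, Bchar]
  apply foldl_pvUpd_eq_of_dom
  · exact pvLensA_pos nums target
  · exact pvLensB_pos nums target
  · intro x hx
    rcases (mem_pvLensA nums target x).1 hx with ⟨a, L, hL, hab, hsum, rfl⟩
    exact pvLensB_dominates nums target a L hL hab hsum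
  · intro y hy
    rcases mem_pvLensB_elim nums target y hy with ⟨k, e, hke, hen, hsum, rfl⟩
    refine ⟨(e : Int) - (k : Int), ?_, le_refl _⟩
    rw [mem_pvLensA]
    exact ⟨k, e - k, by omega, by omega, by rw [show k + (e - k) = e by omega]; omega,
      by omega⟩
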